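-- pv_equiv track=rewrite | github.com/VITA-Group/PA-HMDB51 | tpami_drawing/PA-HMDB51_statistics/bad_label_detection.py | valid_label
-- ===== SOURCE A (Python) =====
-- def valid_label(s,e):
--     '''
--     Judge whether the labeling is valid.
--     Args:
--         s: list of ints. list of starting frame idx.
--         e: list of ints. list of ending frame idx.
--     Return:
--         valid: bool. If truth, the labeling is valid.
--     Valid labeling should satisfy two conditions:
--     1. e_i > s_i
--     2. [e_i, s_i] \intersection [e_j, s_j] = \empty_set
--     '''
--     assert len(s) == len(e)
--     n = len(s)
--     for i in range(n):
--         if not e[i] >= s[i]: # check first condition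
--             return False
--         for j in range(n):
--             if j == i:
--                 continue
--             if s[i] >= s[j] and s[i] <= e[j]: # check second condition
--                 return False
--     return True
-- ===== SOURCE B (Python) =====
-- def valid_label(s, e):
--     '''
--     Judge whether the labeling is valid.
--     Same result as A: every e[i] >= s[i], and no start s[i] lies inside
--     another interval [s[j], e[j]] (j != i).
--     '''
--     assert len(s) == len(e)
--     pairs = list(zip(s, e))
--     if any(ei < si for si, ei in pairs):
--         return False
--     pm = None  # max endpoint among intervals with smaller (earlier-sorted) start
--     for si, ei in sorted(pairs, key=lambda p: p[0]):
--         if pm is not None and si <= pm: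
--             return False
--         pm = ei if pm is None else max(pm, ei)
--     return True
-- ===== Notes on version B (the rewrite author's own statement) =====
-- stated objective: alternative
-- what changed: Replaced the all-pairs containment scan by sort-by-start plus a single pass keeping the running maximum endpoint of earlier-starting intervals (a start is contained in another interval iff it is <= that prefix maximum).
import Mathlib
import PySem

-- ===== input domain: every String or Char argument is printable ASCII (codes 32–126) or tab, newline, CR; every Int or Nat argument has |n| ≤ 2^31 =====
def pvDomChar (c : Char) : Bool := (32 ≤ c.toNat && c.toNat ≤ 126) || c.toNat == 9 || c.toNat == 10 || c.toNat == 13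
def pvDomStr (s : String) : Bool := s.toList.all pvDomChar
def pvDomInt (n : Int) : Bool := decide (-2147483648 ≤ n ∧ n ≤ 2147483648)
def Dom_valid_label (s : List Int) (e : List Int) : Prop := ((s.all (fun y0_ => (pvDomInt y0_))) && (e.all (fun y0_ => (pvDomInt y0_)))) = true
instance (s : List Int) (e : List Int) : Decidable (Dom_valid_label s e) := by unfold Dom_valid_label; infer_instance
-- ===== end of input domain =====

-- B replaces A's all-pairs containment scan by sort-by-start + one prefix-maximum pass over the sorted pairs (objective: alternative algorithm).

-- ===== PORT A =====
-- inner 'for j in range(n)' loop of A: true iff some j in js (j ≠ i) has s[j] <= s[i] <= e[j]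
def vlInner (s e : List Int) (i : Int) : List Int → Bool
  | [] => false
  | j :: rest =>
    if j = i then vlInner s e i rest
    else if PySem.List.pyGetD s i 0 ≥ PySem.List.pyGetD s j 0 ∧ PySem.List.pyGetD s i 0 ≤ PySem.List.pyGetD e j 0 then
      true
    else vlInner s e i rest

-- outer 'for i in range(n)' loop of A
def vlOuter (s e : List Int) (n : Int) : List Int → Bool
  | [] => true
  | i :: rest =>
    if ¬ (PySem.List.pyGetD e i 0 ≥ PySem.List.pyGetD s i 0) then false
    else if vlInner s e i (PySem.List.pyRange 0 n 1) then false
    else vlOuter s e n rest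

def valid_label (s : List Int) (e : List Int) : Bool :=
  let n : Int := s.length
  vlOuter s e n (PySem.List.pyRange 0 n 1)

-- ===== PORT B =====
-- B's scan over the start-sorted pairs, threading the running max endpoint (None before the first pair)
def vlScan : List (Int × Int) → Option Int → Bool
  | [], _ => true
  | (si, ei) :: rest, pm =>
    match pm with
    | none => vlScan rest (some ei)
    | some m => if si ≤ m then false else vlScan rest (some (max m ei))

def valid_label_alt (s : List Int) (e : List Int) : Bool :=
  let pairs := s.zip e
  if pairs.any (fun p => p.2 < p.1) then false
  else vlScan (PySem.List.sorted pairs (fun p => p.1) false) none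

-- ===== PRECONDITION & SPEC =====
-- Pre_ excludes exactly the inputs where A's 'assert len(s) == len(e)' raises AssertionError.
def Pre_valid_label (s : List Int) (e : List Int) : Prop := s.length = e.length
instance (s : List Int) (e : List Int) : Decidable (Pre_valid_label s e) := by unfold Pre_valid_label; infer_instance
def pvWitness_valid_label : List Int × List Int := ([1, 10], [3, 12])

def Spec_valid_label (s : List Int) (e : List Int) (out : Bool) : Prop := out = valid_label_alt s e
instance (s : List Int) (e : List Int) (out : Bool) : Decidable (Spec_valid_label s e out) := by unfold Spec_valid_label; infer_instance

-- ===== CLAIM (what is proved, stated in full; the proofs are below) =====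
def Claim_equal_valid_label : Prop := ∀ (s : List Int) (e : List Int), Dom_valid_label s e → Pre_valid_label s e → Spec_valid_label s e (valid_label s e)

-- ===== LEMMAS AND PROOFS =====

-- "two distinct positions i j with s_i contained in [s_j, e_j]" on a pair list
def BadAt (l : List (Int × Int)) : Prop :=
  ∃ i j : Nat, ∃ (_ : i < l.length) (_ : j < l.length),
    i ≠ j ∧ l[j].1 ≤ l[i].1 ∧ l[i].1 ≤ l[j].2

lemma vlInner_eq_true_iff (s e : List Int) (i : Int) (js : List Int) :
    vlInner s e i js = true ↔ ∃ j ∈ js, j ≠ i ∧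
      PySem.List.pyGetD s j 0 ≤ PySem.List.pyGetD s i 0 ∧
      PySem.List.pyGetD s i 0 ≤ PySem.List.pyGetD e j 0 := by
  induction js with
  | nil => simp [vlInner]
  | cons j rest ih =>
    have hstep : vlInner s e i (j :: rest) =
        (if j = i then vlInner s e i rest
         else if PySem.List.pyGetD s i 0 ≥ PySem.List.pyGetD s j 0 ∧
                  PySem.List.pyGetD s i 0 ≤ PySem.List.pyGetD e j 0 then true
         else vlInner s e i rest) := rfl
    rw [hstep]
    by_cases hj : j = i
    · rw [if_pos hj, ih]
      subst hj
      constructor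
      · rintro ⟨k, hk, h⟩; exact ⟨k, List.mem_cons_of_mem _ hk, h⟩
      · rintro ⟨k, hk, h⟩
        rcases List.mem_cons.mp hk with h1 | h1
        · exact absurd h1 h.1
        · exact ⟨k, h1, h⟩
    · rw [if_neg hj]
      by_cases hc : PySem.List.pyGetD s i 0 ≥ PySem.List.pyGetD s j 0 ∧
          PySem.List.pyGetD s i 0 ≤ PySem.List.pyGetD e j 0
      · rw [if_pos hc]
        simp only [true_iff]
        exact ⟨j, List.mem_cons_self .., hj, hc.1, hc.2⟩
      · rw [if_neg hc, ih]
        constructor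
        · rintro ⟨k, hk, h⟩; exact ⟨k, List.mem_cons_of_mem _ hk, h⟩
        · rintro ⟨k, hk, h⟩
          rcases List.mem_cons.mp hk with h1 | h1
          · subst h1; exact absurd ⟨h.2.1, h.2.2⟩ hc
          · exact ⟨k, h1, h⟩

lemma vlOuter_eq_true_iff (s e : List Int) (n : Int) (is : List Int) :
    vlOuter s e n is = true ↔ ∀ i ∈ is,
      PySem.List.pyGetD s i 0 ≤ PySem.List.pyGetD e i 0 ∧
      vlInner s e i (PySem.List.pyRange 0 n 1) = false := by
  induction is with
  | nil => simp [vlOuter]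
  | cons i rest ih =>
    have hstep : vlOuter s e n (i :: rest) =
        (if ¬ (PySem.List.pyGetD e i 0 ≥ PySem.List.pyGetD s i 0) then false
         else if vlInner s e i (PySem.List.pyRange 0 n 1) then false
         else vlOuter s e n rest) := rfl
    rw [hstep]
    by_cases h1 : PySem.List.pyGetD s i 0 ≤ PySem.List.pyGetD e i 0
    · rw [if_neg (by exact fun h => h h1)]
      by_cases h2 : vlInner s e i (PySem.List.pyRange 0 n 1) = true
      · rw [if_pos h2]
        simp only [Bool.false_eq_true, false_iff]
        intro h
        rw [(h i (List.mem_cons_self ..)).2] at h2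
        exact Bool.false_ne_true h2
      · rw [if_neg h2, ih]
        constructor
        · intro h k hk
          rcases List.mem_cons.mp hk with rfl | hk'
          · exact ⟨h1, Bool.eq_false_iff.mpr h2⟩
          · exact h k hk'
        · intro h k hk; exact h k (List.mem_cons_of_mem _ hk)
    · rw [if_pos (by exact fun h => h1 h)]
      simp only [Bool.false_eq_true, false_iff]
      intro h; exact h1 (h i (List.mem_cons_self ..)).1

lemma vlScan_some_iff (l : List (Int × Int)) (m : Int) :
    vlScan l (some m) = true ↔
      l.Pairwise (fun p q => p.2 < q.1) ∧ ∀ q ∈ l, m < q.1 := by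
  induction l generalizing m with
  | nil => simp [vlScan]
  | cons p rest ih =>
    obtain ⟨si, ei⟩ := p
    have hstep : vlScan ((si, ei) :: rest) (some m) =
        (if si ≤ m then false else vlScan rest (some (max m ei))) := rfl
    rw [hstep]
    split_ifs with h
    · simp only [false_iff]
      rintro ⟨-, h2⟩
      exact absurd (h2 (si, ei) (List.mem_cons_self ..)) (not_lt.mpr h)
    · rw [ih]
      simp only [List.pairwise_cons, List.mem_cons]
      constructor
      · rintro ⟨hpw, hall⟩
        refine ⟨⟨fun q hq => ?_, hpw⟩, ?_⟩
        · exact (max_lt_iff.mp (hall q hq)).2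
        · rintro q (rfl | hq)
          · exact not_le.mp h
          · exact (max_lt_iff.mp (hall q hq)).1
      · rintro ⟨⟨hhead, hpw⟩, hall⟩
        refine ⟨hpw, fun q hq => max_lt_iff.mpr ⟨hall q (Or.inr hq), hhead q hq⟩⟩

lemma vlScan_none_iff (l : List (Int × Int)) :
    vlScan l none = true ↔ l.Pairwise (fun p q => p.2 < q.1) := by
  cases l with
  | nil => simp [vlScan]
  | cons p rest =>
    obtain ⟨si, ei⟩ := p
    have hstep : vlScan ((si, ei) :: rest) none = vlScan rest (some ei) := rfl
    rw [hstep, vlScan_some_iff]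
    simp [List.pairwise_cons, and_comm]

-- a two-element permutation is the pair or its swap
lemma perm_pair_cases {α : Type} {x y a b : α} (h : [x, y].Perm [a, b]) :
    (x = a ∧ y = b) ∨ (x = b ∧ y = a) := by
  have hx : x ∈ [a, b] := h.mem_iff.mp (by simp)
  simp only [List.mem_cons, List.not_mem_nil, or_false] at hx
  rcases hx with rfl | rfl
  · left
    have := List.perm_singleton.mp h.cons_inv
    exact ⟨rfl, by simpa using this⟩
  · right
    have h' : [x, y].Perm [x, a] := h.trans (List.Perm.swap x a [])
    have := List.perm_singleton.mp h'.cons_inv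
    exact ⟨rfl, by simpa using this⟩

lemma perm_pair_eq {α : Type} {u : List α} {p q : α} (h : u.Perm [p, q]) :
    u = [p, q] ∨ u = [q, p] := by
  match u, h.length_eq with
  | [x, y], _ =>
    rcases perm_pair_cases h with ⟨rfl, rfl⟩ | ⟨rfl, rfl⟩
    · exact Or.inl rfl
    · exact Or.inr rfl

-- elements at two increasing positions form a sublist
lemma pair_sublist_of_lt {α : Type} (l : List α) (i j : Nat) (hij : i < j)
    (hj : j < l.length) : List.Sublist [l[i]'(lt_trans hij hj), l[j]] l := by
  have hi : i < l.length := lt_trans hij hj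
  have h1 : List.Sublist (l[i] :: l.drop (i + 1)) l := by
    have hd := List.drop_sublist (l := l) (i := i)
    rwa [List.drop_eq_getElem_cons hi] at hd
  have hlen : j - (i + 1) < (l.drop (i + 1)).length := by
    simp only [List.length_drop]; omega
  have hmem : l[j] ∈ l.drop (i + 1) := by
    have hg : (l.drop (i + 1))[j - (i + 1)]'hlen = l[i + 1 + (j - (i + 1))] :=
      List.getElem_drop
    have : l[i + 1 + (j - (i + 1))]'(by omega) = l[j] := by congr 1; omega
    rw [this] at hg
    exact hg ▸ List.getElem_mem hlen
  exact List.Sublist.trans (List.Sublist.cons₂ _ (List.singleton_sublist.mpr hmem)) h1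

-- a two-element sublist sits at two distinct positions
lemma sublist_pair_idx {α : Type} {a b : α} :
    ∀ {l : List α}, List.Sublist [a, b] l →
      ∃ (i j : Nat) (hi : i < l.length) (hj : j < l.length),
        i ≠ j ∧ l[i] = a ∧ l[j] = b := by
  intro l
  induction l with
  | nil => intro h; simp at h
  | cons x t ih =>
    intro h
    cases h with
    | cons _ h' =>
      obtain ⟨i, j, hi, hj, hij, ha, hb⟩ := ih h'
      exact ⟨i + 1, j + 1, by simpa using Nat.succ_lt_succ hi,
        by simpa using Nat.succ_lt_succ hj, by omega, by simpa using ha, by simpa using hb⟩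
    | cons₂ _ h' =>
      have hbmem : b ∈ t := (List.singleton_sublist).mp h'
      obtain ⟨k, hk, hbk⟩ := List.mem_iff_getElem.mp hbmem
      exact ⟨0, k + 1, by simp, by simpa using Nat.succ_lt_succ hk,
        by omega, rfl, by simpa using hbk⟩

-- BadAt is invariant under permutation
lemma badAt_of_perm {l l' : List (Int × Int)} (hp : l.Perm l') (h : BadAt l) :
    BadAt l' := by
  obtain ⟨i, j, hi, hj, hij, h1, h2⟩ := h
  -- extract the ordered pair (position order) as a sublist of l
  have hsub : (List.Sublist [l[i], l[j]] l ∧ True) ∨ (List.Sublist [l[j], l[i]] l ∧ True) := by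
    rcases Nat.lt_or_ge i j with hlt | hge
    · exact Or.inl ⟨pair_sublist_of_lt l i j hlt hj, trivial⟩
    · have hlt : j < i := lt_of_le_of_ne hge (Ne.symm hij)
      exact Or.inr ⟨pair_sublist_of_lt l j i hlt hi, trivial⟩
  -- in both cases we have a 2-list u <+ l whose elements are p := l[i], q := l[j] in some order
  rcases hsub with ⟨hs, -⟩ | ⟨hs, -⟩
  all_goals {
    have hsp := (hs.subperm).trans hp.subperm
    obtain ⟨u, hu_perm, hu_sub⟩ := hsp
    rcases perm_pair_eq hu_perm with rfl | rfl
    all_goals {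
      obtain ⟨i', j', hi', hj', hij', ha, hb⟩ := sublist_pair_idx hu_sub
      first
      | exact ⟨i', j', hi', hj', hij', by rw [ha, hb]; exact h1, by rw [ha, hb]; exact h2⟩
      | exact ⟨j', i', hj', hi', Ne.symm hij', by rw [ha, hb]; exact h1, by rw [ha, hb]; exact h2⟩
    }
  }

-- on a start-sorted list with e ≥ s, containment = failure of the strict prefix condition
lemma badAt_sorted_iff {l : List (Int × Int)}
    (hsort : l.Pairwise (fun p q => p.1 ≤ q.1))
    (hE : ∀ p ∈ l, p.1 ≤ p.2) :
    BadAt l ↔ ¬ l.Pairwise (fun p q => p.2 < q.1) := by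
  rw [List.pairwise_iff_getElem] at hsort ⊢
  constructor
  · rintro ⟨i, j, hi, hj, hij, h1, h2⟩ hpw
    rcases Nat.lt_or_ge j i with hlt | hge
    · exact absurd h2 (not_le.mpr (hpw j i hj hi hlt))
    · have hlt : i < j := lt_of_le_of_ne hge hij
      have hs1 : l[i].1 ≤ l[j].1 := hsort i j hi hj hlt
      have heq : l[i].1 = l[j].1 := le_antisymm hs1 h1
      have h3 : l[i].2 < l[j].1 := hpw i j hi hj hlt
      have h4 : l[i].1 ≤ l[i].2 := hE l[i] (List.getElem_mem hi)
      omega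
  · intro hpw
    push Not at hpw
    obtain ⟨i, j, hi, hj, hij, h1⟩ := hpw
    exact ⟨j, i, hj, hi, by omega, hsort i j hi hj hij, h1⟩
lemma getIntD (xs : List Int) (k : Nat) (hk : k < xs.length) :
    PySem.List.pyGetD xs ((k : Nat) : Int) 0 = xs[k] := by
  rw [PySem.List.pyGetD_natCast]
  exact List.getD_eq_getElem xs 0 hk

-- A returns true iff every interval has e ≥ s and no containment at two distinct indices
lemma A_iff (s e : List Int) (hlen : s.length = e.length) :
    valid_label s e = true ↔
      ((∀ p ∈ s.zip e, p.1 ≤ p.2) ∧ ¬ BadAt (s.zip e)) := by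
  have hZlen : (s.zip e).length = s.length := by
    simp [List.length_zip, hlen]
  unfold valid_label
  rw [vlOuter_eq_true_iff]
  constructor
  · intro h
    constructor
    · intro p hp
      obtain ⟨k, hk, rfl⟩ := List.mem_iff_getElem.mp hp
      have hk' : k < s.length := by rw [hZlen] at hk; exact hk
      have hke : k < e.length := by omega
      have hmem : ((k : Nat) : Int) ∈ PySem.List.pyRange 0 (s.length : Int) 1 :=
        PySem.List.mem_pyRange_one.mpr ⟨Int.natCast_nonneg k, by exact_mod_cast hk'⟩
      have h1 := (h _ hmem).1
      rw [getIntD s k hk', getIntD e k hke] at h1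
      simpa [List.getElem_zip] using h1
    · rintro ⟨i, j, hi, hj, hij, hb1, hb2⟩
      have hi' : i < s.length := by rw [hZlen] at hi; exact hi
      have hj' : j < s.length := by rw [hZlen] at hj; exact hj
      have hje : j < e.length := by omega
      have hmemi : ((i : Nat) : Int) ∈ PySem.List.pyRange 0 (s.length : Int) 1 :=
        PySem.List.mem_pyRange_one.mpr ⟨Int.natCast_nonneg i, by exact_mod_cast hi'⟩
      have hmemj : ((j : Nat) : Int) ∈ PySem.List.pyRange 0 (s.length : Int) 1 :=
        PySem.List.mem_pyRange_one.mpr ⟨Int.natCast_nonneg j, by exact_mod_cast hj'⟩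
      have h2 := (h _ hmemi).2
      have hb1' : s[j] ≤ s[i] := by simpa [List.getElem_zip] using hb1
      have hb2' : s[i] ≤ e[j] := by simpa [List.getElem_zip] using hb2
      have htrue : vlInner s e ((i : Nat) : Int) (PySem.List.pyRange 0 (s.length : Int) 1) = true := by
        rw [vlInner_eq_true_iff]
        refine ⟨((j : Nat) : Int), hmemj, ?_, ?_, ?_⟩
        · intro hji
          exact hij (by exact_mod_cast hji.symm)
        · rw [getIntD s j hj', getIntD s i hi']; exact hb1'
        · rw [getIntD s i hi', getIntD e j hje]; exact hb2'
      rw [htrue] at h2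
      exact Bool.noConfusion h2
  · rintro ⟨hE, hBad⟩ i hmem
    rw [PySem.List.mem_pyRange_one] at hmem
    obtain ⟨h0, hn⟩ := hmem
    obtain ⟨k, rfl⟩ : ∃ k : Nat, i = (k : Int) := ⟨i.toNat, (Int.toNat_of_nonneg h0).symm⟩
    have hk : k < s.length := by exact_mod_cast hn
    have hke : k < e.length := by omega
    have hkz : k < (s.zip e).length := by rw [hZlen]; exact hk
    constructor
    · have hp := hE ((s.zip e)[k]'hkz) (List.getElem_mem hkz)
      rw [List.getElem_zip] at hp
      rw [getIntD s k hk, getIntD e k hke]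
      exact hp
    · cases hIn : vlInner s e ((k : Nat) : Int) (PySem.List.pyRange 0 (s.length : Int) 1) with
      | false => rfl
      | true =>
        exfalso
        rw [vlInner_eq_true_iff] at hIn
        obtain ⟨j, hjmem, hjne, hc1, hc2⟩ := hIn
        rw [PySem.List.mem_pyRange_one] at hjmem
        obtain ⟨hj0, hjn⟩ := hjmem
        obtain ⟨m, rfl⟩ : ∃ m : Nat, j = (m : Int) := ⟨j.toNat, (Int.toNat_of_nonneg hj0).symm⟩
        have hm : m < s.length := by exact_mod_cast hjn
        have hme : m < e.length := by omega
        have hmz : m < (s.zip e).length := by rw [hZlen]; exact hm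
        rw [getIntD s m hm, getIntD s k hk] at hc1
        rw [getIntD s k hk, getIntD e m hme] at hc2
        refine hBad ⟨k, m, hkz, hmz, ?_, ?_, ?_⟩
        · intro hkm
          exact hjne (by exact_mod_cast hkm.symm)
        · rw [List.getElem_zip, List.getElem_zip]; exact hc1
        · rw [List.getElem_zip, List.getElem_zip]; exact hc2

-- B returns true iff every interval has e ≥ s and the sorted scan condition holds
lemma B_iff (s e : List Int) :
    valid_label_alt s e = true ↔
      ((∀ p ∈ s.zip e, p.1 ≤ p.2) ∧
        (PySem.List.sorted (s.zip e) (fun p => p.1) false).Pairwise (fun p q => p.2 < q.1)) := by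
  unfold valid_label_alt
  by_cases hany : (s.zip e).any (fun p => p.2 < p.1) = true
  · rw [if_pos hany]
    simp only [Bool.false_eq_true, false_iff]
    rintro ⟨hE, -⟩
    rw [List.any_eq_true] at hany
    obtain ⟨p, hp, hlt⟩ := hany
    have h1 := hE p hp
    have h2 : p.2 < p.1 := by simpa using hlt
    omega
  · rw [if_neg hany, vlScan_none_iff]
    have hE : ∀ p ∈ s.zip e, p.1 ≤ p.2 := by
      intro p hp
      by_contra hc
      exact hany (List.any_eq_true.mpr ⟨p, hp, by simpa using not_le.mp hc⟩)
    exact ⟨fun h => ⟨hE, h⟩, fun h => h.2⟩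

-- ===== VERDICT (by name: the statement is the Claim_ definition above) =====
theorem valid_label_spec : Claim_equal_valid_label := by
  intro s e _ hpre
  unfold Spec_valid_label
  have hlen : s.length = e.length := hpre
  rw [Bool.eq_iff_iff, A_iff s e hlen, B_iff s e]
  have hperm : (PySem.List.sorted (s.zip e) (fun p => p.1) false).Perm (s.zip e) :=
    PySem.List.sorted_perm (s.zip e) (fun p => p.1) false
  have hsort := PySem.List.sorted_pairwise (s.zip e) (fun p => p.1)
  constructor
  · rintro ⟨hE, hnb⟩
    have hEL : ∀ p ∈ PySem.List.sorted (s.zip e) (fun p => p.1) false, p.1 ≤ p.2 :=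
      fun p hp => hE p (hperm.mem_iff.mp hp)
    refine ⟨hE, ?_⟩
    by_contra hnp
    exact hnb (badAt_of_perm hperm ((badAt_sorted_iff hsort hEL).mpr hnp))
  · rintro ⟨hE, hp⟩
    have hEL : ∀ p ∈ PySem.List.sorted (s.zip e) (fun p => p.1) false, p.1 ≤ p.2 :=
      fun p hp => hE p (hperm.mem_iff.mp hp)
    exact ⟨hE, fun hb => (badAt_sorted_iff hsort hEL).mp (badAt_of_perm hperm.symm hb) hp⟩
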